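-- pv_equiv track=rewrite | github.com/xsuite/xcoll | xcoll/pretty_print/helpers.py | _splitlines_spans_plain
-- ===== SOURCE A (Python) =====
-- def _splitlines_spans_plain(text: str, keepends: bool):
--     spans, i, n = [], 0, len(text)
--     while i < n:
--         j = i
--         while j < n and text[j] not in "\r\n":
--             j += 1
--         line_end = j
--         if j < n:
--             if text[j] == "\r" and j+1 < n and text[j+1] == "\n":
--                 j += 2
--                 end = j if keepends else line_end
--             else:
--                 j += 1
--                 end = j if keepends else line_end
--             spans.append((i, end))
--             i = j
--         else:
--             spans.append((i, line_end))
--             i = j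
--     return spans
-- ===== SOURCE B (Python) =====
-- def _splitlines_spans_plain(text, keepends):
--     n = len(text)
--     # phase 1: locate every line terminator (CRLF preferred, else lone CR/LF)
--     terms = []
--     i = 0
--     while i < n:
--         if text.startswith('\r\n', i):
--             terms.append((i, i + 2))
--             i += 2
--         elif text[i] == '\r' or text[i] == '\n':
--             terms.append((i, i + 1))
--             i += 1
--         else:
--             i += 1
--     # phase 2: pair consecutive terminators into line spans
--     spans = []
--     start = 0
--     for ts, te in terms:
--         spans.append((start, te if keepends else ts))
--         start = te
--     if start < n:
--         spans.append((start, n))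
--     return spans
-- ===== Notes on version B (the rewrite author's own statement) =====
-- stated objective: alternative
-- what changed: Replaces A's single nested scan-and-emit while loop by two phases: one pass that collects all line-terminator (start,end) pairs (CRLF preferred), then a simple fold pairing consecutive terminators into spans with the trailing line appended once at the end.
import Mathlib
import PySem

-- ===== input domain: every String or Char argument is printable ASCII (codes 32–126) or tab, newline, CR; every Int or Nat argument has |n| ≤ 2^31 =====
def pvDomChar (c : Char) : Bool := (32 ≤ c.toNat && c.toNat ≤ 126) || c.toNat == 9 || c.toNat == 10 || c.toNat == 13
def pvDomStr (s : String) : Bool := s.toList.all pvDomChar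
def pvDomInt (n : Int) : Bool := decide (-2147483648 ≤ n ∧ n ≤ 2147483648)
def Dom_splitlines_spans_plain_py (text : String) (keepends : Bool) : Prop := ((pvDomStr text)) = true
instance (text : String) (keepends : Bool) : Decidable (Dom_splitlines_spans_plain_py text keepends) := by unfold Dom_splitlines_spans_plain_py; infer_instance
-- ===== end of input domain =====

-- B replaces A's nested scan-and-append loop by two phases: first collect all line
-- terminators, then pair them into spans (objective: alternative decomposition, same cost).

-- ===== PORT A =====
-- inner while loop: advance j past non-terminator characters
def pvAInner (cs : List Char) (n j : Nat) : Nat :=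
  if h : j < n ∧ cs.getD j 'A' ≠ '\r' ∧ cs.getD j 'A' ≠ '\n' then
    pvAInner cs n (j + 1)
  else j
termination_by n - j
decreasing_by have := h.1; omega

-- cited by pvAOuter's termination proof
theorem pvAInner_ge (cs : List Char) (n i : Nat) : i ≤ pvAInner cs n i := by
  rw [pvAInner]
  split
  · have := pvAInner_ge cs n (i + 1); omega
  · exact le_refl i
termination_by n - i
decreasing_by omega

-- outer while loop of A
def pvAOuter (cs : List Char) (n : Nat) (keepends : Bool) (i : Nat)
    (spans : List (Int × Int)) : List (Int × Int) :=
  if hi : i < n then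
    let j := pvAInner cs n i
    if hj : j < n then
      if cs.getD j 'A' = '\r' ∧ j + 1 < n ∧ cs.getD (j + 1) 'A' = '\n' then
        pvAOuter cs n keepends (j + 2)
          (spans ++ [((i : Int), if keepends then ((j + 2 : Nat) : Int) else (j : Int))])
      else
        pvAOuter cs n keepends (j + 1)
          (spans ++ [((i : Int), if keepends then ((j + 1 : Nat) : Int) else (j : Int))])
    else spans ++ [((i : Int), (j : Int))]
  else spans
termination_by n - i
decreasing_by
  · have := pvAInner_ge cs n i; omega
  · have := pvAInner_ge cs n i; omega

def splitlines_spans_plain_py (text : String) (keepends : Bool) : List (Int × Int) :=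
  pvAOuter text.toList text.toList.length keepends 0 []

-- ===== PORT B =====
-- phase 1 of Source B: the while loop collecting terminator (start, end) pairs;
-- text.startswith('\r\n', i) is ported exactly as "text[i]='\r' ∧ i+1<n ∧ text[i+1]='\n'"
def pvTerms (cs : List Char) (n i : Nat) : List (Nat × Nat) :=
  if hi : i < n then
    if cs.getD i 'A' = '\r' ∧ i + 1 < n ∧ cs.getD (i + 1) 'A' = '\n' then
      (i, i + 2) :: pvTerms cs n (i + 2)
    else if cs.getD i 'A' = '\r' ∨ cs.getD i 'A' = '\n' then
      (i, i + 1) :: pvTerms cs n (i + 1)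
    else pvTerms cs n (i + 1)
  else []
termination_by n - i
decreasing_by all_goals omega

def splitlines_spans_plain_py_alt (text : String) (keepends : Bool) : List (Int × Int) :=
  let cs := text.toList
  let n := cs.length
  let terms := pvTerms cs n 0
  -- phase 2 of Source B: fold the append loop over terms, then the trailing line
  let p := terms.foldl
    (fun (acc : List (Int × Int) × Nat) (t : Nat × Nat) =>
      (acc.1 ++ [((acc.2 : Int), if keepends then (t.2 : Int) else (t.1 : Int))], t.2))
    ([], 0)
  if p.2 < n then p.1 ++ [((p.2 : Int), (n : Int))] else p.1

-- ===== PRECONDITION & SPEC =====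
def Spec_splitlines_spans_plain_py (text : String) (keepends : Bool) (out : List (Int × Int)) : Prop := out = splitlines_spans_plain_py_alt text keepends
instance (text : String) (keepends : Bool) (out : List (Int × Int)) : Decidable (Spec_splitlines_spans_plain_py text keepends out) := by unfold Spec_splitlines_spans_plain_py; infer_instance

-- ===== CLAIM (what is proved, stated in full; the proofs are below) =====
def Claim_equal_splitlines_spans_plain_py : Prop := ∀ (text : String) (keepends : Bool), Dom_splitlines_spans_plain_py text keepends → Spec_splitlines_spans_plain_py text keepends (splitlines_spans_plain_py text keepends)

-- ===== LEMMAS AND PROOFS =====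

-- cons-shaped reference form of Source B's phase 2
def pvBuild (keepends : Bool) (n : Nat) : List (Nat × Nat) → Nat → List (Int × Int)
  | [], start => if start < n then [((start : Int), (n : Int))] else []
  | (ts, te) :: rest, start =>
      ((start : Int), if keepends then (te : Int) else (ts : Int)) :: pvBuild keepends n rest te

theorem pvFold_build (keepends : Bool) (n : Nat) :
    ∀ (terms : List (Nat × Nat)) (spans : List (Int × Int)) (start : Nat),
    (let p := terms.foldl
        (fun (acc : List (Int × Int) × Nat) (t : Nat × Nat) =>
          (acc.1 ++ [((acc.2 : Int), if keepends then (t.2 : Int) else (t.1 : Int))], t.2))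
        (spans, start)
      if p.2 < n then p.1 ++ [((p.2 : Int), (n : Int))] else p.1)
    = spans ++ pvBuild keepends n terms start := by
  intro terms
  induction terms with
  | nil =>
      intro spans start
      simp only [List.foldl, pvBuild]
      split <;> simp
  | cons t rest ih =>
      intro spans start
      obtain ⟨ts, te⟩ := t
      simp only [List.foldl, pvBuild]
      rw [ih]
      simp

theorem pvAInner_le (cs : List Char) (n i : Nat) (h : i ≤ n) : pvAInner cs n i ≤ n := by
  rw [pvAInner]
  split
  · next hc => exact pvAInner_le cs n (i + 1) (by omega)
  · exact h
termination_by n - i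
decreasing_by have := ‹i < n ∧ _›.1; omega

theorem pvAInner_term (cs : List Char) (n i : Nat) (h : pvAInner cs n i < n) :
    cs.getD (pvAInner cs n i) 'A' = '\r' ∨ cs.getD (pvAInner cs n i) 'A' = '\n' := by
  rw [pvAInner] at h ⊢
  by_cases hc : i < n ∧ cs.getD i 'A' ≠ '\r' ∧ cs.getD i 'A' ≠ '\n'
  · rw [dif_pos hc] at h ⊢
    exact pvAInner_term cs n (i + 1) h
  · rw [dif_neg hc] at h ⊢
    by_cases hr : cs.getD i 'A' = '\r'
    · exact Or.inl hr
    · by_cases hn : cs.getD i 'A' = '\n'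
      · exact Or.inr hn
      · exact absurd ⟨h, hr, hn⟩ hc
termination_by n - i
decreasing_by have := hc.1; omega

theorem pvTerms_inner (cs : List Char) (n i : Nat) :
    pvTerms cs n i = pvTerms cs n (pvAInner cs n i) := by
  rw [pvAInner]
  split
  · next hc =>
      have hstep : pvTerms cs n i = pvTerms cs n (i + 1) := by
        rw [pvTerms]
        rw [dif_pos hc.1]
        rw [if_neg (by rintro ⟨h1, _⟩; exact hc.2.1 h1)]
        rw [if_neg (by rintro (h1 | h1); exacts [hc.2.1 h1, hc.2.2 h1])]
      rw [hstep]
      exact pvTerms_inner cs n (i + 1)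
  · rfl
termination_by n - i
decreasing_by have := ‹i < n ∧ _›.1; omega

theorem pvMain (cs : List Char) (n : Nat) (keepends : Bool) :
    ∀ (k i : Nat) (spans : List (Int × Int)), n - i ≤ k →
    pvAOuter cs n keepends i spans = spans ++ pvBuild keepends n (pvTerms cs n i) i := by
  intro k
  induction k with
  | zero =>
      intro i spans hk
      have hi : ¬ i < n := by omega
      rw [pvAOuter, dif_neg hi, pvTerms, dif_neg hi]
      simp [pvBuild, hi]
  | succ k ih =>
      intro i spans hk
      by_cases hi : i < n
      · rw [pvAOuter, dif_pos hi]
        simp only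
        set j := pvAInner cs n i with hjdef
        have hij : i ≤ j := pvAInner_ge cs n i
        rw [pvTerms_inner cs n i, ← hjdef]
        by_cases hj : j < n
        · rw [dif_pos hj]
          by_cases hcrlf : cs.getD j 'A' = '\r' ∧ j + 1 < n ∧ cs.getD (j + 1) 'A' = '\n'
          · rw [if_pos hcrlf]
            rw [pvTerms, dif_pos hj, if_pos hcrlf]
            rw [ih (j + 2) _ (by omega)]
            simp [pvBuild]
          · rw [if_neg hcrlf]
            have hterm := pvAInner_term cs n i (by rw [← hjdef] at *; exact hj)
            rw [← hjdef] at hterm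
            rw [pvTerms, dif_pos hj, if_neg hcrlf, if_pos hterm]
            rw [ih (j + 1) _ (by omega)]
            simp [pvBuild]
        · rw [dif_neg hj]
          have hjn : j = n := by
            have := pvAInner_le cs n i (by omega); omega
          rw [pvTerms, dif_neg hj]
          simp [pvBuild, hjn, hi]
      · rw [pvAOuter, dif_neg hi, pvTerms, dif_neg hi]
        simp [pvBuild, hi]

-- ===== VERDICT (by name: the statement is the Claim_ definition above) =====
theorem splitlines_spans_plain_py_spec : Claim_equal_splitlines_spans_plain_py := by
  intro text keepends _
  unfold Spec_splitlines_spans_plain_py splitlines_spans_plain_py splitlines_spans_plain_py_alt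
  rw [pvMain text.toList text.toList.length keepends (text.toList.length) 0 [] (by omega)]
  rw [← pvFold_build keepends text.toList.length (pvTerms text.toList text.toList.length 0) [] 0]
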